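-- pv_equiv track=rewrite | github.com/ganeshkumarputta/ai-career-assistant | backend/speech_analyzer.py | analyze_speech
-- ===== SOURCE A (Python) =====
-- def analyze_speech(text):
--     words = text.split()
--     filler_words = ["um", "uh", "like"]
--     filler_count = sum(words.count(f) for f in filler_words)
--
--     confidence = max(0, 100 - filler_count * 5)
--
--     return {
--         "confidence_score": confidence,
--         "filler_words": filler_count
--     }
-- ===== SOURCE B (Python) =====
-- def analyze_speech(text):
--     fillers = ("um", "uh", "like")
--     filler_count = 0
--     word = ""
--     for c in text:
--         if c.isspace():
--             if word and word in fillers: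
--                 filler_count += 1
--             word = ""
--         else:
--             word += c
--     if word and word in fillers:
--         filler_count += 1
--     confidence = max(0, 100 - filler_count * 5)
--     return {
--         "confidence_score": confidence,
--         "filler_words": filler_count
--     }
-- ===== Notes on version B (the rewrite author's own statement) =====
-- stated objective: alternative
-- what changed: Replaces A's split-then-three-.count-scans with a single character-level tokenizer state machine that counts filler tokens on the fly, never materializing the word list.
import Mathlib
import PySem

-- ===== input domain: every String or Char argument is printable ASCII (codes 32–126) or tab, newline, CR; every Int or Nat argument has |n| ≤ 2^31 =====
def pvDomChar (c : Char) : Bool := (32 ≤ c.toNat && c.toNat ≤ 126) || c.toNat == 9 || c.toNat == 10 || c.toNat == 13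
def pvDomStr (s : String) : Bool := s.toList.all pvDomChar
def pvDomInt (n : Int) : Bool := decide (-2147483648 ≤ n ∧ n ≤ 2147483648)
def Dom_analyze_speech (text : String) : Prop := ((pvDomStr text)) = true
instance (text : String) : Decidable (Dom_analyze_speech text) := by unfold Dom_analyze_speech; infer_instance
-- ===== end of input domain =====

-- B scans the characters once with a small tokenizer state machine, counting filler tokens as they
-- end, instead of A's split() followed by three full .count scans; same result (alternative algorithm).

-- ===== PORT A =====
def analyze_speech (text : String) : List (String × Int) :=
  let words := PySem.Str.split₀ text
  let filler_words : List String := ["um", "uh", "like"]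
  let filler_count : Int := (filler_words.map (fun f => (PySem.List.count words f : Int))).sum
  let confidence : Int := max 0 (100 - filler_count * 5)
  [("confidence_score", confidence), ("filler_words", filler_count)]

-- ===== PORT B =====
-- 'word in ("um","uh","like")' of Source B, on the current token's characters
def pvIsFiller (w : List Char) : Bool :=
  w == "um".toList || w == "uh".toList || w == "like".toList

-- the for-loop of Source B: state = (current word, filler_count); the trailing nil case is the
-- post-loop 'if word and word in fillers' check
def pvCountFillers : List Char → List Char → Int → Int
  | [], word, n => if !word.isEmpty && pvIsFiller word then n + 1 else n
  | c :: rest, word, n =>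
    if PySem.Chars.isspace c then
      pvCountFillers rest [] (if !word.isEmpty && pvIsFiller word then n + 1 else n)
    else
      pvCountFillers rest (word ++ [c]) n

def analyze_speech_alt (text : String) : List (String × Int) :=
  let filler_count : Int := pvCountFillers text.toList [] 0
  let confidence : Int := max 0 (100 - filler_count * 5)
  [("confidence_score", confidence), ("filler_words", filler_count)]

-- ===== PRECONDITION & SPEC =====
def Spec_analyze_speech (text : String) (out : List (String × Int)) : Prop := out = analyze_speech_alt text
instance (text : String) (out : List (String × Int)) : Decidable (Spec_analyze_speech text out) := by unfold Spec_analyze_speech; infer_instance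

-- ===== CLAIM (what is proved, stated in full; the proofs are below) =====
def Claim_equal_analyze_speech : Prop := ∀ (text : String), Dom_analyze_speech text → Spec_analyze_speech text (analyze_speech text)

-- ===== LEMMAS AND PROOFS =====

-- split₀.go's accumulator prepends reversed
lemma split0_go_acc (chars : List Char) : ∀ (cur : List Char) (acc : List (List Char)),
    PySem.Chars.split₀.go chars cur acc = acc.reverse ++ PySem.Chars.split₀.go chars cur [] := by
  induction chars with
  | nil =>
    intro cur acc
    by_cases h : cur.isEmpty <;> simp [PySem.Chars.split₀.go, h]
  | cons c rest ih =>
    intro cur acc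
    by_cases hs : PySem.Chars.isspace c
    · by_cases h : cur.isEmpty
      · simp only [PySem.Chars.split₀.go, hs, h, if_true]
        exact ih [] acc
      · simp only [PySem.Chars.split₀.go, hs, h, if_true, if_false, Bool.false_eq_true]
        rw [ih [] (cur.reverse :: acc), ih [] [cur.reverse]]
        simp
    · simp only [PySem.Chars.split₀.go, hs, if_false, Bool.false_eq_true]
      exact ih _ acc

-- the tokenizer count equals the number of filler words among split₀'s tokens
lemma countFillers_eq (chars : List Char) : ∀ (word : List Char) (n : Int),
    pvCountFillers chars word n
      = n + ((PySem.Chars.split₀.go chars word.reverse []).countP pvIsFiller : Int) := by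
  induction chars with
  | nil =>
    intro word n
    by_cases h : word.isEmpty
    · simp_all [pvCountFillers, PySem.Chars.split₀.go, List.isEmpty_iff]
    · have h' : word.reverse.isEmpty = false := by
        simp_all [List.isEmpty_iff]
      simp [pvCountFillers, PySem.Chars.split₀.go, h, h', List.countP_cons]
      by_cases hf : pvIsFiller word <;> simp [hf]
  | cons c rest ih =>
    intro word n
    by_cases hs : PySem.Chars.isspace c
    · by_cases h : word.isEmpty
      · have h' : word.reverse.isEmpty = true := by simp_all [List.isEmpty_iff]
        simp only [pvCountFillers, PySem.Chars.split₀.go, hs, h, h', if_true]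
        simpa using ih [] n
      · have h' : word.reverse.isEmpty = false := by simp_all [List.isEmpty_iff]
        simp only [pvCountFillers, PySem.Chars.split₀.go, hs, h, h', if_true, if_false,
          Bool.not_false, Bool.true_and, Bool.false_eq_true]
        rw [split0_go_acc rest [] [word.reverse.reverse]]
        have := ih [] (if pvIsFiller word then n + 1 else n)
        simp only [List.reverse_nil] at this ⊢
        rw [this]
        simp [List.countP_cons]
        by_cases hf : pvIsFiller word
        · simp [hf]
          ring
        · simp [hf]
    · simp only [pvCountFillers, PySem.Chars.split₀.go, hs, if_false, Bool.false_eq_true]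
      have := ih (word ++ [c]) n
      simpa using this

-- A's three per-filler counts sum to one countP over the tokens
lemma threeCounts (l : List (List Char)) :
    ((List.map String.ofList l).count "um" + ((List.map String.ofList l).count "uh"
      + (List.map String.ofList l).count "like"))
      = l.countP pvIsFiller := by
  induction l with
  | nil => rfl
  | cons w ws ih =>
    have hum : String.ofList w = ("um" : String) ↔ w = "um".toList := by
      constructor
      · intro hc; have h2 := congrArg String.toList hc; simpa using h2
      · intro hc; subst hc; rfl
    have huh : String.ofList w = ("uh" : String) ↔ w = "uh".toList := by
      constructor
      · intro hc; have h2 := congrArg String.toList hc; simpa using h2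
      · intro hc; subst hc; rfl
    have hlike : String.ofList w = ("like" : String) ↔ w = "like".toList := by
      constructor
      · intro hc; have h2 := congrArg String.toList hc; simpa using h2
      · intro hc; subst hc; rfl
    simp only [List.map_cons, List.count_cons, List.countP_cons, beq_iff_eq, hum, huh, hlike,
      pvIsFiller]
    by_cases h1 : w = "um".toList <;> by_cases h2 : w = "uh".toList <;>
      by_cases h3 : w = "like".toList <;> simp_all <;> omega

-- ===== VERDICT (by name: the statement is the Claim_ definition above) =====
theorem analyze_speech_spec : Claim_equal_analyze_speech := by
  intro text _
  unfold Spec_analyze_speech analyze_speech analyze_speech_alt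
  simp only [List.map, List.sum_cons, List.sum_nil, add_zero, PySem.List.count,
    PySem.Str.split₀, PySem.Chars.split₀]
  have hB := countFillers_eq text.toList [] 0
  simp only [List.reverse_nil, zero_add] at hB
  rw [hB]
  have hA := threeCounts (PySem.Chars.split₀.go text.toList [] [])
  have hA' : ((List.map String.ofList (PySem.Chars.split₀.go text.toList [] [])).count "um" : Int)
      + (((List.map String.ofList (PySem.Chars.split₀.go text.toList [] [])).count "uh" : Int)
      + ((List.map String.ofList (PySem.Chars.split₀.go text.toList [] [])).count "like" : Int))
      = ((PySem.Chars.split₀.go text.toList [] []).countP pvIsFiller : Int) := by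
    exact_mod_cast hA
  rw [hA']
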